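-- pv_equiv track=rewrite | github.com/Wataki0824/shift-manager | generate_shift.py | select_y_candidate
-- ===== SOURCE A (Python) =====
-- def select_y_candidate(
--     candidates: list,
--     y_counts: dict,
--     prev_day_off: dict
-- ) -> str:
--     """
--     Yマークを割り当てる候補を選ぶ
--
--     優先順位:
--     1. 前日が休みでない人
--     2. Yの回数が少ない人
--     """
--     if not candidates:
--         raise ValueError("候補者がいません")
--
--     if len(candidates) == 1:
--         return candidates[0]
--
--     # 前日が休みでない人を優先
--     not_after_off = [c for c in candidates if not prev_day_off.get(c, False)]
--
--     if not_after_off: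
--         # 休み明けでない人の中でYが少ない人を選ぶ
--         target_list = not_after_off
--     else:
--         # 全員休み明けなら条件を緩和
--         target_list = candidates
--
--     # Yの回数が最小の人を選ぶ
--     min_y = min(y_counts[c] for c in target_list)
--     min_y_candidates = [c for c in target_list if y_counts[c] == min_y]
--
--     # 同点なら最初の人（安定性のため）
--     return min_y_candidates[0]
-- ===== SOURCE B (Python) =====
-- def select_y_candidate(
--     candidates: list,
--     y_counts: dict,
--     prev_day_off: dict
-- ) -> str:
--     if not candidates:
--         raise ValueError("候補者がいません")
--     # Non-after-off candidates sort first (False < True); ties broken by fewest Y,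
--     # then by min's stability (first in list). Subsumes A's explicit branches.
--     return min(candidates, key=lambda c: (prev_day_off.get(c, False), y_counts[c]))
-- ===== Notes on version B (the rewrite author's own statement) =====
-- stated objective: simpler
-- what changed: Replaces A's explicit singleton branch, filter/relaxation branch and two-pass min-then-filter selection with a single stable min over a composite (after-off, y-count) key.
-- outside the precondition, e.g. on select_y_candidate(['a'], {}, {}): A returns 'a', B raises KeyError; on select_y_candidate(['a', 'b'], {'b': 0}, {'a': True}): A returns 'b', B raises KeyError
import Mathlib
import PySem

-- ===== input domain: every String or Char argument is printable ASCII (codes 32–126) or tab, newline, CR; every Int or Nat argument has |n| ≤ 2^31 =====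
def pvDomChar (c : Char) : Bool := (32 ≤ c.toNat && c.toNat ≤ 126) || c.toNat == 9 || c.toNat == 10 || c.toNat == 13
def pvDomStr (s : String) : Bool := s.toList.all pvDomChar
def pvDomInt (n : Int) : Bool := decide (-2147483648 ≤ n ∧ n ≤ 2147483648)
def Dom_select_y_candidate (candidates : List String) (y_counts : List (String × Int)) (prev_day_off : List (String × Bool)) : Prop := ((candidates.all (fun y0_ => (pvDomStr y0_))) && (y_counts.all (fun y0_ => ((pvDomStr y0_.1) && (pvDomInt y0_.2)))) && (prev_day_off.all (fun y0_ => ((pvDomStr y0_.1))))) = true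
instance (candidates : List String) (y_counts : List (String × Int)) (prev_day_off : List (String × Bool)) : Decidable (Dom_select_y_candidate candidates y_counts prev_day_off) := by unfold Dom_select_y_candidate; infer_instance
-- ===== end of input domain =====

-- B replaces A's singleton branch, filter/relaxation branch and two-pass min-then-filter
-- selection with one stable min over the composite (after-off, y-count) key; objective: simpler.

-- dict.get(k, dflt) on an association list: first match (shared by both ports)
def pvGetD {ν : Type} (d : List (String × ν)) (k : String) (dflt : ν) : ν :=
  match d.find? (fun kv => kv.1 == k) with
  | some kv => kv.2
  | none => dflt

-- ===== PORT A =====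
def select_y_candidate (candidates : List String) (y_counts : List (String × Int)) (prev_day_off : List (String × Bool)) : String :=
  if candidates = [] then ""            -- Python raises ValueError here (excluded by Pre_)
  else if candidates.length = 1 then candidates.headD ""
  else
    let not_after_off := candidates.filter (fun c => !(pvGetD prev_day_off c false))
    let target_list := if not_after_off = [] then candidates else not_after_off
    -- y_counts[c]: KeyError for a missing key is excluded by Pre_; pvGetD with dummy default 0
    match PySem.List.min? (target_list.map (fun c => pvGetD y_counts c 0)) (fun v => v) with
    | none => ""                        -- unreachable: target_list is nonempty
    | some min_y => (target_list.filter (fun c => pvGetD y_counts c 0 == min_y)).headD ""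

-- ===== PORT B =====
def select_y_candidate_alt (candidates : List String) (y_counts : List (String × Int)) (prev_day_off : List (String × Bool)) : String :=
  if candidates = [] then ""            -- Python raises ValueError here (excluded by Pre_)
  else
    match PySem.List.min2? candidates (fun c => pvGetD prev_day_off c false) (fun c => pvGetD y_counts c 0) with
    | some m => m
    | none => ""                        -- unreachable: candidates is nonempty

-- ===== PRECONDITION & SPEC =====
-- Pre_ excludes (i) empty candidates, where A raises ValueError, and (ii) inputs where some
-- candidate is missing from y_counts: B's composite key looks up every candidate, so B raises
-- KeyError there, while A returns on the singleton/after-off sub-cases it never looks up.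
def Pre_select_y_candidate (candidates : List String) (y_counts : List (String × Int)) (prev_day_off : List (String × Bool)) : Prop :=
  candidates ≠ [] ∧ ∀ c ∈ candidates, c ∈ y_counts.map Prod.fst
instance (candidates : List String) (y_counts : List (String × Int)) (prev_day_off : List (String × Bool)) : Decidable (Pre_select_y_candidate candidates y_counts prev_day_off) := by unfold Pre_select_y_candidate; infer_instance

def pvWitness_select_y_candidate : List String × (List (String × Int)) × (List (String × Bool)) :=
  (["alice", "bob"], [("alice", 2), ("bob", 1)], [("alice", false)])

def Spec_select_y_candidate (candidates : List String) (y_counts : List (String × Int)) (prev_day_off : List (String × Bool)) (out : String) : Prop := out = select_y_candidate_alt candidates y_counts prev_day_off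
instance (candidates : List String) (y_counts : List (String × Int)) (prev_day_off : List (String × Bool)) (out : String) : Decidable (Spec_select_y_candidate candidates y_counts prev_day_off out) := by unfold Spec_select_y_candidate; infer_instance

-- ===== CLAIM (what is proved, stated in full; the proofs are below) =====
def Claim_equal_select_y_candidate : Prop := ∀ (candidates : List String) (y_counts : List (String × Int)) (prev_day_off : List (String × Bool)), Dom_select_y_candidate candidates y_counts prev_day_off → Pre_select_y_candidate candidates y_counts prev_day_off → Spec_select_y_candidate candidates y_counts prev_day_off (select_y_candidate candidates y_counts prev_day_off)

-- ===== LEMMAS AND PROOFS =====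

-- strict lexicographic comparison used by min2?'s fold
def pvLt (f : String → Bool) (g : String → Int) (x m : String) : Bool :=
  decide (f x < f m) || (!decide (f m < f x) && decide (g x < g m))

def pvStep (f : String → Bool) (g : String → Int) (acc : Option String) (x : String) : Option String :=
  match acc with
  | none => some x
  | some m => if pvLt f g x m then some x else some m

lemma min2?_as_fold (cs : List String) (f : String → Bool) (g : String → Int) :
    PySem.List.min2? cs f g = cs.foldl (pvStep f g) none := by
  unfold PySem.List.min2?
  apply List.foldl_ext
  intro acc x _
  cases acc with
  | none => rfl
  | some m => rfl

lemma pvLt_irrefl (f : String → Bool) (g : String → Int) (x : String) : pvLt f g x x = false := by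
  simp [pvLt]

lemma pvLt_asymm (f : String → Bool) (g : String → Int) {x m : String}
    (h : pvLt f g x m = true) : pvLt f g m x = false := by
  simp only [pvLt, Bool.or_eq_true, Bool.and_eq_true, Bool.not_eq_true', decide_eq_true_eq,
    Bool.or_eq_false_iff, Bool.and_eq_false_iff, Bool.not_eq_false',
    decide_eq_false_iff_not] at h ⊢
  cases hfx : f x <;> cases hfm : f m <;> simp_all [Bool.lt_iff] <;> omega

lemma pvLt_le_lt (f : String → Bool) (g : String → Int) {x m m' : String}
    (h1 : pvLt f g x m' = false) (h2 : pvLt f g x m = true) : pvLt f g m' m = true := by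
  simp only [pvLt, Bool.or_eq_true, Bool.and_eq_true, Bool.not_eq_true', decide_eq_true_eq,
    Bool.or_eq_false_iff, Bool.and_eq_false_iff, Bool.not_eq_false',
    decide_eq_false_iff_not] at h1 h2 ⊢
  cases hfx : f x <;> cases hfm : f m <;> cases hfm' : f m' <;> simp_all [Bool.lt_iff] <;> omega

lemma pvLt_lt_le (f : String → Bool) (g : String → Int) {x m m' : String}
    (h1 : pvLt f g m' m = true) (h2 : pvLt f g x m = false) : pvLt f g m' x = true := by
  simp only [pvLt, Bool.or_eq_true, Bool.and_eq_true, Bool.not_eq_true', decide_eq_true_eq,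
    Bool.or_eq_false_iff, Bool.and_eq_false_iff, Bool.not_eq_false',
    decide_eq_false_iff_not] at h1 h2 ⊢
  cases hfx : f x <;> cases hfm : f m <;> cases hfm' : f m' <;> simp_all [Bool.lt_iff] <;> omega

-- the fold of min2? returns the FIRST lexicographically minimal element
lemma fold_char (f : String → Bool) (g : String → Int) :
    ∀ (t : List String) (m : String),
      ∃ m' l₁ l₂, List.foldl (pvStep f g) (some m) t = some m' ∧
        m :: t = l₁ ++ m' :: l₂ ∧
        (∀ y ∈ l₁, pvLt f g m' y = true) ∧
        (∀ y ∈ m :: t, pvLt f g y m' = false) := by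
  intro t
  induction t with
  | nil =>
      intro m
      exact ⟨m, [], [], rfl, rfl, by simp, by simp [pvLt_irrefl]⟩
  | cons x t ih =>
      intro m
      by_cases hx : pvLt f g x m = true
      · obtain ⟨m', l₁, l₂, hfold, hdec, hfirst, hmin⟩ := ih x
        have hm'm : pvLt f g m' m = true := pvLt_le_lt f g (hmin x (by simp)) hx
        refine ⟨m', m :: l₁, l₂, ?_, by simpa using hdec, ?_, ?_⟩
        · simpa [List.foldl_cons, pvStep, hx] using hfold
        · intro c hc
          rcases List.mem_cons.mp hc with rfl | hc
          · exact hm'm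
          · exact hfirst c hc
        · intro c hc
          rcases List.mem_cons.mp hc with rfl | hc
          · exact pvLt_asymm f g hm'm
          · exact hmin c hc
      · have hx' : pvLt f g x m = false := by simpa using hx
        obtain ⟨m', l₁, l₂, hfold, hdec, hfirst, hmin⟩ := ih m
        have hfold' : List.foldl (pvStep f g) (some m) (x :: t) = some m' := by
          simpa [List.foldl_cons, pvStep, hx'] using hfold
        cases l₁ with
        | nil =>
            simp only [List.nil_append, List.cons.injEq] at hdec
            refine ⟨m', [], x :: l₂, hfold', by simp [hdec.1, hdec.2], by simp, ?_⟩
            intro c hc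
            rcases List.mem_cons.mp hc with rfl | hc
            · exact hmin c (by simp)
            · rcases List.mem_cons.mp hc with rfl | hc
              · rw [← hdec.1]; exact hx'
              · exact hmin c (by simp [hc])
        | cons a l₁' =>
            simp only [List.cons_append, List.cons.injEq] at hdec
            obtain ⟨ham, hdec'⟩ := hdec
            have hm'a : pvLt f g m' a = true := hfirst a (by simp)
            have hm'm : pvLt f g m' m = true := by rw [ham]; exact hm'a
            have hm'x : pvLt f g m' x = true := pvLt_lt_le f g hm'm hx'
            refine ⟨m', a :: x :: l₁', l₂, hfold', by simp [ham, hdec'], ?_, ?_⟩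
            · intro c hc
              rcases List.mem_cons.mp hc with rfl | hc
              · exact hm'a
              · rcases List.mem_cons.mp hc with rfl | hc
                · exact hm'x
                · exact hfirst c (by simp [hc])
            · intro c hc
              rcases List.mem_cons.mp hc with rfl | hc
              · exact hmin c (by simp)
              · rcases List.mem_cons.mp hc with rfl | hc
                · exact pvLt_asymm f g hm'x
                · exact hmin c (by simp [hc])

-- the first minimal element is unique
lemma char_unique (f : String → Bool) (g : String → Int) :
    ∀ (l₁ : List String) {r₁ l₂ r₂ : List String} {a b : String},
      l₁ ++ a :: l₂ = r₁ ++ b :: r₂ →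
      (∀ y ∈ l₁, pvLt f g a y = true) →
      (∀ y ∈ r₁, pvLt f g b y = true) →
      (∀ y ∈ l₁ ++ a :: l₂, pvLt f g y a = false) →
      (∀ y ∈ r₁ ++ b :: r₂, pvLt f g y b = false) →
      a = b := by
  intro l₁
  induction l₁ with
  | nil =>
      intro r₁ l₂ r₂ a b heq hfa hfb hma hmb
      cases r₁ with
      | nil =>
          simp only [List.nil_append, List.cons.injEq] at heq
          exact heq.1
      | cons c r₁' =>
          simp only [List.nil_append, List.cons_append, List.cons.injEq] at heq
          have h1 : pvLt f g b a = true := by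
            rw [heq.1]; exact hfb c (by simp)
          have h2 : pvLt f g b a = false := hma b (by simp [heq.2])
          simp_all
  | cons c l₁' ih =>
      intro r₁ l₂ r₂ a b heq hfa hfb hma hmb
      cases r₁ with
      | nil =>
          simp only [List.cons_append, List.nil_append, List.cons.injEq] at heq
          have h1 : pvLt f g a b = true := by
            rw [← heq.1]; exact hfa c (by simp)
          have h2 : pvLt f g a b = false := hmb a (by simp [← heq.2])
          simp_all
      | cons c' r₁' =>
          simp only [List.cons_append, List.cons.injEq] at heq
          exact ih heq.2 (fun y hy => hfa y (by simp [hy])) (fun y hy => hfb y (by simp [hy]))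
            (fun y hy => hma y (by simp only [List.cons_append]; exact List.mem_cons_of_mem _ hy))
            (fun y hy => hmb y (by simp only [List.cons_append]; exact List.mem_cons_of_mem _ hy))

-- A's main branch returns the first lexicographically minimal element of candidates
lemma A_char (y : List (String × Int)) (p : List (String × Bool)) (x : String) (t : List String)
    (hlen : ¬((x :: t).length = 1)) :
    ∃ v r₁ r₂, select_y_candidate (x :: t) y p = v ∧
      x :: t = r₁ ++ v :: r₂ ∧
      (∀ c ∈ r₁, pvLt (fun c => pvGetD p c false) (fun c => pvGetD y c 0) v c = true) ∧
      (∀ c ∈ x :: t, pvLt (fun c => pvGetD p c false) (fun c => pvGetD y c 0) c v = false) := by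
  by_cases hnao : (x :: t).filter (fun c => !(pvGetD p c false)) = []
  · -- everybody is after a day off: target_list = candidates
    have hall : ∀ c ∈ x :: t, pvGetD p c false = true := by
      intro c hc
      have := List.filter_eq_nil_iff.mp hnao c hc
      simpa using this
    obtain ⟨mY, hmy⟩ : ∃ mY, PySem.List.min? ((x :: t).map (fun c => pvGetD y c 0)) (fun v => v) = some mY := by
      cases h : PySem.List.min? ((x :: t).map (fun c => pvGetD y c 0)) (fun v => v) with
      | none => simp [PySem.List.min?_eq_none_iff] at h
      | some mY => exact ⟨mY, rfl⟩
    have hisMin : ∀ c ∈ x :: t, mY ≤ pvGetD y c 0 := by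
      intro c hc
      exact PySem.List.min?_isMin hmy _ (List.mem_map_of_mem hc)
    obtain ⟨c₀, hc₀, hgc₀⟩ := List.mem_map.mp (PySem.List.min?_mem hmy)
    obtain ⟨v, rest, hmins⟩ : ∃ v rest,
        (x :: t).filter (fun c => pvGetD y c 0 == mY) = v :: rest := by
      cases h : (x :: t).filter (fun c => pvGetD y c 0 == mY) with
      | nil =>
          exfalso
          have hno := List.filter_eq_nil_iff.mp h c₀ hc₀
          simp [hgc₀] at hno
      | cons v rest => exact ⟨v, rest, rfl⟩
    obtain ⟨r₁, r₂, hdec, hr₁, hv, -⟩ := List.filter_eq_cons_iff.mp hmins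
    have hgv : pvGetD y v 0 = mY := by simpa using hv
    have hvmem : v ∈ x :: t := by rw [hdec]; simp
    refine ⟨v, r₁, r₂, ?_, hdec, ?_, ?_⟩
    · simp only [select_y_candidate, if_neg (List.cons_ne_nil x t), if_neg hlen]
      rw [if_pos hnao]
      simp only [hmy, hmins, List.headD_cons]
    · intro c hc
      have hcmem : c ∈ x :: t := by rw [hdec]; exact List.mem_append_left _ hc
      have hgc : pvGetD y c 0 ≠ mY := by simpa using hr₁ c hc
      have hle : mY ≤ pvGetD y c 0 := hisMin c hcmem
      simp only [pvLt, hall c hcmem, hall v hvmem, hgv]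
      simp
      omega
    · intro c hc
      have hle : mY ≤ pvGetD y c 0 := hisMin c hc
      simp only [pvLt, hall c hc, hall v hvmem, hgv]
      simp
      omega
  · -- some candidate is not after a day off: target_list = not_after_off
    obtain ⟨mY, hmy⟩ : ∃ mY, PySem.List.min?
        (((x :: t).filter (fun c => !(pvGetD p c false))).map (fun c => pvGetD y c 0))
        (fun v => v) = some mY := by
      cases h : PySem.List.min?
          (((x :: t).filter (fun c => !(pvGetD p c false))).map (fun c => pvGetD y c 0))
          (fun v => v) with
      | none => rw [PySem.List.min?_eq_none_iff] at h; simp [hnao] at h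
      | some mY => exact ⟨mY, rfl⟩
    have hisMin : ∀ c ∈ x :: t, pvGetD p c false = false → mY ≤ pvGetD y c 0 := by
      intro c hc hfc
      exact PySem.List.min?_isMin hmy _
        (List.mem_map_of_mem (List.mem_filter.mpr ⟨hc, by simp [hfc]⟩))
    obtain ⟨c₀, hc₀, hgc₀⟩ := List.mem_map.mp (PySem.List.min?_mem hmy)
    have hc₀' := List.mem_filter.mp hc₀
    obtain ⟨v, rest, hmins⟩ : ∃ v rest,
        (x :: t).filter (fun c => (pvGetD y c 0 == mY) && !(pvGetD p c false)) = v :: rest := by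
      cases h : (x :: t).filter (fun c => (pvGetD y c 0 == mY) && !(pvGetD p c false)) with
      | nil =>
          exfalso
          have hno := List.filter_eq_nil_iff.mp h c₀ hc₀'.1
          simp [hgc₀, hc₀'.2] at hno
      | cons v rest => exact ⟨v, rest, rfl⟩
    obtain ⟨r₁, r₂, hdec, hr₁, hv, -⟩ := List.filter_eq_cons_iff.mp hmins
    have hv' : pvGetD y v 0 = mY ∧ pvGetD p v false = false := by
      simpa using hv
    have hvmem : v ∈ x :: t := by rw [hdec]; simp
    refine ⟨v, r₁, r₂, ?_, hdec, ?_, ?_⟩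
    · simp only [select_y_candidate, if_neg (List.cons_ne_nil x t), if_neg hlen]
      rw [if_neg hnao]
      simp only [hmy, List.filter_filter, hmins, List.headD_cons]
    · intro c hc
      have hcmem : c ∈ x :: t := by rw [hdec]; exact List.mem_append_left _ hc
      have hr := hr₁ c hc
      cases hfc : pvGetD p c false with
      | true => simp [pvLt, hfc, hv'.2]
      | false =>
          have hgc : pvGetD y c 0 ≠ mY := by
            simp only [Bool.and_eq_true, beq_iff_eq, hfc, Bool.not_false, and_true] at hr
            simpa using hr
          have hle : mY ≤ pvGetD y c 0 := hisMin c hcmem hfc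
          simp only [pvLt, hfc, hv'.2, hv'.1]
          simp
          omega
    · intro c hc
      cases hfc : pvGetD p c false with
      | true => simp [pvLt, hfc, hv'.2]
      | false =>
          have hle : mY ≤ pvGetD y c 0 := hisMin c hc hfc
          simp only [pvLt, hfc, hv'.2, hv'.1]
          simp
          omega

-- ===== VERDICT (by name: the statement is the Claim_ definition above) =====
theorem select_y_candidate_spec : Claim_equal_select_y_candidate := by
  intro cs y p _hdom hpre
  obtain ⟨hne, -⟩ := hpre
  unfold Spec_select_y_candidate
  cases cs with
  | nil => exact absurd rfl hne
  | cons x t =>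
    obtain ⟨m', l₁, l₂, hfold, hdecB, hfirstB, hminB⟩ :=
      fold_char (fun c => pvGetD p c false) (fun c => pvGetD y c 0) t x
    have hB : select_y_candidate_alt (x :: t) y p = m' := by
      simp only [select_y_candidate_alt, if_neg (List.cons_ne_nil x t), min2?_as_fold]
      rw [show List.foldl (pvStep (fun c => pvGetD p c false) (fun c => pvGetD y c 0)) none (x :: t)
            = List.foldl (pvStep (fun c => pvGetD p c false) (fun c => pvGetD y c 0)) (some x) t from rfl,
          hfold]
    rw [hB]
    by_cases hlen : (x :: t).length = 1
    · have ht : t = [] := by simpa using hlen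
      subst ht
      have hm : m' = x := by
        simpa using hfold.symm
      simp [select_y_candidate, hm]
    · obtain ⟨v, r₁, r₂, hA, hdecA, hfirstA, hminA⟩ := A_char y p x t hlen
      rw [hA]
      exact char_unique (fun c => pvGetD p c false) (fun c => pvGetD y c 0) r₁
        (by rw [← hdecA, hdecB]) hfirstA hfirstB
        (fun c hc => hminA c (by rw [hdecA]; exact hc))
        (fun c hc => hminB c (by rw [hdecB]; exact hc))
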